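-- pv_equiv track=rewrite | github.com/mrdev-19/AutoTyper | AutoWriter/parser.py | israndomrandom
-- ===== SOURCE A (Python) =====
-- def israndomrandom(x):
--     if(x<15):
--         flag=False
--         for i in range(2,x):
--             if (x%i) == 0:
--                 # if factor is found, set flag to True
--                 flag = True
--                 # break out of loop
--                 break
--     else:
--         return False
--     # check if flag is True
--     if flag:
--         return True
--     else:
--         return False
-- ===== SOURCE B (Python) =====
-- def israndomrandom(x):
--     # x passes A's test iff x is a composite number below 15: a fixed finite set.
--     return x in (4, 6, 8, 9, 10, 12, 14)
-- ===== Notes on version B (the rewrite author's own statement) =====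
-- stated objective: simpler
-- what changed: Replaces the trial-division loop over range(2,x) with a direct membership test against the fixed finite set of composite numbers below 15.
import Mathlib
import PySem

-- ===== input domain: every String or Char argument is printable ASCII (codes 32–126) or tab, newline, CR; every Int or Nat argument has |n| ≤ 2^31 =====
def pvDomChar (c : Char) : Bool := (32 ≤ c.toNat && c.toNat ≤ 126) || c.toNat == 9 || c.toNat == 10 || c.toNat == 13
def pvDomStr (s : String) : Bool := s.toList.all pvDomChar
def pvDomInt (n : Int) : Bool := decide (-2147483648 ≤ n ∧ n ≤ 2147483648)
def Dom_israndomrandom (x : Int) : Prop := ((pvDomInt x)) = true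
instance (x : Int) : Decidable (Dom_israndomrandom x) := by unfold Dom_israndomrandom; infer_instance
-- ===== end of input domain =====

-- B replaces A's trial-division loop with a constant membership test against the
-- composites below 15 (objective: simpler).

-- ===== PORT A =====
-- the for-loop only sets a flag and breaks, so it is ported as List.any over range(2,x)
def israndomrandom (x : Int) : Bool :=
  if x < 15 then
    (PySem.List.pyRange 2 x 1).any (fun i => PySem.Int.mod x i == 0)
  else
    false

-- ===== PORT B =====
def israndomrandom_alt (x : Int) : Bool :=
  x == 4 || x == 6 || x == 8 || x == 9 || x == 10 || x == 12 || x == 14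

-- ===== PRECONDITION & SPEC =====
def Spec_israndomrandom (x : Int) (out : Bool) : Prop := out = israndomrandom_alt x
instance (x : Int) (out : Bool) : Decidable (Spec_israndomrandom x out) := by unfold Spec_israndomrandom; infer_instance

-- ===== CLAIM (what is proved, stated in full; the proofs are below) =====
def Claim_equal_israndomrandom : Prop := ∀ (x : Int), Dom_israndomrandom x → Spec_israndomrandom x (israndomrandom x)

-- ===== LEMMAS AND PROOFS =====

-- for x ≤ 2 the loop range is empty, so A returns false, as does B
theorem israndomrandom_small (x : Int) (h : x ≤ 2) :
    israndomrandom x = israndomrandom_alt x := by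
  have hrange : PySem.List.pyRange 2 x 1 = [] := by
    rw [PySem.List.pyRange_one]
    have : (x - 2).toNat = 0 := by omega
    simp [this]
  simp [israndomrandom, israndomrandom_alt, hrange]
  omega

-- ===== VERDICT (by name: the statement is the Claim_ definition above) =====
theorem israndomrandom_spec : Claim_equal_israndomrandom := by
  intro x _
  unfold Spec_israndomrandom
  by_cases h2 : x ≤ 2
  · exact israndomrandom_small x h2
  · by_cases h15 : x < 15
    · interval_cases x <;> decide
    · simp [israndomrandom, israndomrandom_alt, h15]
      omega
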